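-- pv_equiv track=rewrite | github.com/neloduka-sobe/matura-informatyka | algorytmy/szyfr_przestawieniowy.py | szyfr
-- ===== SOURCE A (Python) =====
-- def szyfr(x):
-- 	samogloski = ('a', 'e', 'i', 'o', 'u', 'y')
-- 	ret = ["" for i in range(len(x))]
-- 	last = ''
-- 	f = -1
-- 	for ind, i in enumerate(x):
-- 		if i in samogloski:
-- 			ret[ind] = i
-- 		else:
-- 			if f > -1:
-- 				ret[ind] = last
-- 				last = i
-- 			else:
-- 				f = ind
-- 				last = i
-- 	if f > -1:
-- 		ret[f] = last
-- 	return ''.join(ret)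
-- ===== SOURCE B (Python) =====
-- def szyfr(x):
-- 	samogloski = ('a', 'e', 'i', 'o', 'u', 'y')
-- 	chars = list(x)
-- 	pos = [i for i, c in enumerate(x) if c not in samogloski]
-- 	nonv = [chars[i] for i in pos]
-- 	nonv = nonv[-1:] + nonv[:-1]
-- 	for i, c in zip(pos, nonv):
-- 		chars[i] = c
-- 	return ''.join(chars)
-- ===== Notes on version B (the rewrite author's own statement) =====
-- stated objective: simpler
-- what changed: Replaces the stateful single pass with last/f sentinel bookkeeping and a post-loop fix-up by an explicit gather-rotate-scatter: collect the non-vowel positions and characters, rotate that character list right by one, and write it back.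
import Mathlib
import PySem

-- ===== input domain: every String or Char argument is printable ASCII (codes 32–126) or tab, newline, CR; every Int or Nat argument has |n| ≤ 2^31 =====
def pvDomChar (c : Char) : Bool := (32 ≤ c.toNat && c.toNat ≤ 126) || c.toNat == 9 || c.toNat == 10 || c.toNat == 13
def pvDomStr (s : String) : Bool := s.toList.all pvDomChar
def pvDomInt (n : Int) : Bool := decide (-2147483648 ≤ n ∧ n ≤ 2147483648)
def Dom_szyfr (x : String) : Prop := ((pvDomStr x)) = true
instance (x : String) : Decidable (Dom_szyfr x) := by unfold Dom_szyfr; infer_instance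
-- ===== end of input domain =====

-- B replaces A's stateful single pass (last/f sentinels + post-loop fix-up) by a gather-rotate-scatter
-- over the non-vowel positions; objective: simpler. Return values proved equal on all inputs.

-- ===== PORT A =====
-- Python's tuple ('a','e','i','o','u','y'), used only for membership tests.
def szyfrVow : List Char := ['a', 'e', 'i', 'o', 'u', 'y']

-- the loop body of A; state = (ret, last, f).  Python's one-char strings are singleton char lists.
def szyfrStep (st : List (List Char) × List Char × Int) (p : Int × Char) :
    List (List Char) × List Char × Int :=
  if szyfrVow.contains p.2 then (PySem.List.pySetD st.1 p.1 [p.2], st.2.1, st.2.2)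
  else if st.2.2 > -1 then (PySem.List.pySetD st.1 p.1 st.2.1, [p.2], st.2.2)
  else (st.1, [p.2], p.1)
  -- ret[ind] = … : ind is an in-range enumerate index, so the total pySetD is exact here

def szyfr (x : String) : String :=
  let cs := x.toList
  let st := (PySem.List.enumerate cs 0).foldl szyfrStep (List.replicate cs.length [], [], -1)
  let ret := if st.2.2 > -1 then PySem.List.pySetD st.1 st.2.2 st.2.1 else st.1
  String.mk (PySem.Chars.join [] ret)   -- ''.join(ret)

-- ===== PORT B =====
def szyfr_alt (x : String) : String :=
  let cs := x.toList
  let pos := ((PySem.List.enumerate cs 0).filter (fun p => !szyfrVow.contains p.2)).map Prod.fst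
  let nonv := pos.map (fun i => PySem.List.pyGetD cs i ' ')   -- chars[i], i an in-range index
  let nonv := PySem.List.slice nonv (some (-1)) none ++ PySem.List.slice nonv none (some (-1))
  let chars := (pos.zip nonv).foldl (fun r p => PySem.List.pySetD r p.1 p.2) cs
  String.mk chars   -- ''.join(chars)

-- ===== PRECONDITION & SPEC =====
def Spec_szyfr (x : String) (out : String) : Prop := out = szyfr_alt x
instance (x : String) (out : String) : Decidable (Spec_szyfr x out) := by unfold Spec_szyfr; infer_instance

-- ===== CLAIM (what is proved, stated in full; the proofs are below) =====
def Claim_equal_szyfr : Prop := ∀ (x : String), Dom_szyfr x → Spec_szyfr x (szyfr x)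

-- ===== LEMMAS AND PROOFS =====

-- non-vowel characters of cs, in order
def nvchars (cs : List Char) : List Char := cs.filter (fun c => !szyfrVow.contains c)

-- values A writes at the successive positions of cs once the first non-vowel was seen with carry l
def avals : List Char → Char → List Char
  | [], _ => []
  | c :: cs, l => if szyfrVow.contains c then c :: avals cs l else l :: avals cs c

-- A's `last` after processing cs with current carry l
def acarry : List Char → Char → Char
  | [], l => l
  | c :: cs, l => if szyfrVow.contains c then acarry cs l else acarry cs c

-- the common output: vowels fixed, non-vowels rotated right by one
def ospec : List Char → List Char
  | [] => []
  | c :: cs => if szyfrVow.contains c then c :: ospec cs else acarry cs c :: avals cs c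

-- replace the successive non-vowel positions of cs by the successive elements of vs
def repNV : List Char → List Char → List Char
  | [], _ => []
  | c :: cs, vs =>
    if szyfrVow.contains c then c :: repNV cs vs
    else match vs with
      | [] => c :: repNV cs []
      | v :: vs' => v :: repNV cs vs'

theorem pySetD_append_cons {α : Type} (r : List α) (e : α) (t : List α) (v : α) :
    PySem.List.pySetD (r ++ e :: t) ((r.length : Int)) v = r ++ v :: t := by
  rw [PySem.List.pySetD_natCast]; simp

theorem drop_length_pred {α : Type} (a : α) (l : List α) :
    (a :: l).drop ((a :: l).length - 1) = [l.getLastD a] := by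
  induction l generalizing a with
  | nil => rfl
  | cons b l ih =>
    rw [List.getLastD_cons]
    simpa only [List.length_cons, Nat.add_sub_cancel, List.drop_succ_cons] using ih b

-- ===== A-side characterisation =====

theorem A_go (cs : List Char) : ∀ (r rest : List (List Char)) (l0 : Char) (f : Int),
    f > -1 → rest.length = cs.length →
    (PySem.List.enumerate cs ((r.length : Int))).foldl szyfrStep (r ++ rest, [l0], f)
      = (r ++ (avals cs l0).map (fun c => [c]), [acarry cs l0], f) := by
  induction cs with
  | nil => intro r rest l0 f hf hlen
           simp [PySem.List.enumerate, avals, acarry, List.length_eq_zero_iff.mp hlen]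
  | cons c cs ih =>
    intro r rest l0 f hf hlen
    obtain ⟨e, rest', rfl⟩ : ∃ e rest', rest = e :: rest' := by
      cases rest with
      | nil => simp at hlen
      | cons e rest' => exact ⟨e, rest', rfl⟩
    rw [PySem.List.enumerate_cons, List.foldl_cons]
    by_cases hv : c ∈ szyfrVow
    · have hstep : szyfrStep (r ++ e :: rest', [l0], f) ((r.length : Int), c)
          = ((r ++ [[c]]) ++ rest', [l0], f) := by
        simp [szyfrStep, hv]
      rw [hstep]
      have hcast : ((r.length : Int) + 1) = (((r ++ [[c]]).length : Int)) := by simp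
      rw [hcast, ih (r ++ [[c]]) rest' l0 f hf (by simpa using hlen)]
      simp [avals, acarry, hv]
    · have hstep : szyfrStep (r ++ e :: rest', [l0], f) ((r.length : Int), c)
          = ((r ++ [[l0]]) ++ rest', [c], f) := by
        simp [szyfrStep, hv, hf]
      rw [hstep]
      have hcast : ((r.length : Int) + 1) = (((r ++ [[l0]]).length : Int)) := by simp
      rw [hcast, ih (r ++ [[l0]]) rest' c f hf (by simpa using hlen)]
      simp [avals, acarry, hv]

theorem A_main (cs : List Char) : ∀ (r : List (List Char)) (l : List Char),
    (fun st : List (List Char) × List Char × Int =>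
        if st.2.2 > -1 then PySem.List.pySetD st.1 st.2.2 st.2.1 else st.1)
      ((PySem.List.enumerate cs ((r.length : Int))).foldl szyfrStep
        (r ++ List.replicate cs.length [], l, -1))
      = r ++ (ospec cs).map (fun c => [c]) := by
  induction cs with
  | nil => intro r l; simp [PySem.List.enumerate, ospec]
  | cons c cs ih =>
    intro r l
    rw [PySem.List.enumerate_cons, List.foldl_cons]
    by_cases hv : c ∈ szyfrVow
    · have hstep : szyfrStep (r ++ List.replicate (c :: cs).length [], l, -1) ((r.length : Int), c)
          = ((r ++ [[c]]) ++ List.replicate cs.length [], l, -1) := by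
        simp [szyfrStep, hv, List.replicate_succ]
      rw [hstep]
      have hcast : ((r.length : Int) + 1) = (((r ++ [[c]]).length : Int)) := by simp
      rw [hcast, ih (r ++ [[c]]) l]
      simp [ospec, hv]
    · have hstep : szyfrStep (r ++ List.replicate (c :: cs).length [], l, -1) ((r.length : Int), c)
          = ((r ++ [[]]) ++ List.replicate cs.length [], [c], (r.length : Int)) := by
        simp [szyfrStep, hv, List.replicate_succ]
      rw [hstep]
      have hcast : ((r.length : Int) + 1) = (((r ++ [[]]).length : Int)) := by simp
      rw [hcast, A_go cs (r ++ [[]]) (List.replicate cs.length []) c (r.length : Int)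
            (by omega) (by simp)]
      have hpos : ((r.length : Int)) > -1 := by omega
      simp only [hpos, if_pos]
      rw [List.append_assoc, List.singleton_append, pySetD_append_cons]
      simp [ospec, hv]

theorem szyfr_eq_ospec (x : String) : szyfr x = String.mk (ospec x.toList) := by
  unfold szyfr
  have h := A_main x.toList [] []
  simp only [List.length_nil, Nat.cast_zero, List.nil_append] at h
  simp only [h]
  congr 1
  exact PySem.Chars.join_nil_singletons (ospec x.toList)

-- ===== B-side characterisation =====

theorem repNV_nil (cs : List Char) : repNV cs [] = cs := by
  induction cs with
  | nil => rfl
  | cons c cs ih => by_cases hv : c ∈ szyfrVow <;> simp [repNV, hv, ih]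

theorem B_scatter (cs : List Char) : ∀ (vs : List Char) (r : List Char),
    (((((PySem.List.enumerate cs ((r.length : Int))).filter
          (fun p => !szyfrVow.contains p.2)).map Prod.fst).zip vs).foldl
        (fun r p => PySem.List.pySetD r p.1 p.2) (r ++ cs))
      = r ++ repNV cs vs := by
  induction cs with
  | nil => intro vs r; simp [PySem.List.enumerate, repNV]
  | cons c cs ih =>
    intro vs r
    rw [PySem.List.enumerate_cons]
    by_cases hv : c ∈ szyfrVow
    · rw [List.filter_cons_of_neg (by simp [hv])]
      have hcast : ((r.length : Int) + 1) = (((r ++ [c]).length : Int)) := by simp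
      rw [hcast]
      have h := ih vs (r ++ [c])
      simpa [repNV, hv] using h
    · rw [List.filter_cons_of_pos (by simp [hv])]
      cases vs with
      | nil => simp [repNV, hv, repNV_nil]
      | cons v vs' =>
        simp only [List.map_cons, List.zip_cons_cons, List.foldl_cons]
        have hstep : PySem.List.pySetD (r ++ c :: cs) ((r.length : Int)) v
            = (r ++ [v]) ++ cs := by
          rw [pySetD_append_cons]; simp
        rw [hstep]
        have hcast : ((r.length : Int) + 1) = (((r ++ [v]).length : Int)) := by simp
        rw [hcast, ih vs' (r ++ [v])]
        simp [repNV, hv]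

theorem acarry_eq_getLastD (cs : List Char) : ∀ (l : Char),
    acarry cs l = (nvchars cs).getLastD l := by
  induction cs with
  | nil => intro l; rfl
  | cons c cs ih =>
    intro l
    by_cases hv : c ∈ szyfrVow
    · simp [acarry, nvchars, hv, ih]
    · have hnv : nvchars (c :: cs) = c :: nvchars cs := by simp [nvchars, hv]
      rw [show acarry (c :: cs) l = acarry cs c from by simp [acarry, hv], ih c, hnv,
        List.getLastD_cons]

theorem avals_eq_repNV (cs : List Char) : ∀ (l : Char),
    avals cs l = repNV cs ((l :: nvchars cs).dropLast) := by
  induction cs with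
  | nil => intro l; rfl
  | cons c cs ih =>
    intro l
    by_cases hv : c ∈ szyfrVow
    · have hnv : nvchars (c :: cs) = nvchars cs := by simp [nvchars, hv]
      simp [avals, repNV, hnv, hv, ih l]
    · have hnv : nvchars (c :: cs) = c :: nvchars cs := by simp [nvchars, hv]
      rw [hnv, List.dropLast_cons₂]
      simp [avals, repNV, hv, ih c]

theorem repNV_rot (cs : List Char) :
    repNV cs ((nvchars cs).drop ((nvchars cs).length - 1) ++ (nvchars cs).dropLast)
      = ospec cs := by
  induction cs with
  | nil => rfl
  | cons c cs ih =>
    by_cases hv : c ∈ szyfrVow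
    · have hnv : nvchars (c :: cs) = nvchars cs := by simp [nvchars, hv]
      rw [hnv]
      simp [repNV, hv, ospec, ih]
    · have hnv : nvchars (c :: cs) = c :: nvchars cs := by simp [nvchars, hv]
      rw [hnv, drop_length_pred, List.singleton_append]
      simp [repNV, hv, ospec, acarry_eq_getLastD, avals_eq_repNV]

theorem szyfr_alt_eq_ospec (x : String) : szyfr_alt x = String.mk (ospec x.toList) := by
  have hnonv : (((PySem.List.enumerate x.toList 0).filter
        (fun p => !szyfrVow.contains p.2)).map Prod.fst).map
          (fun i => PySem.List.pyGetD x.toList i ' ') = nvchars x.toList := by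
    rw [List.map_map]
    have h1 : ∀ p ∈ (PySem.List.enumerate x.toList 0).filter (fun p => !szyfrVow.contains p.2),
        ((fun i => PySem.List.pyGetD x.toList i ' ') ∘ Prod.fst) p = Prod.snd p := by
      intro p hp
      have hmem := List.mem_of_mem_filter hp
      rw [PySem.List.mem_enumerate_iff] at hmem
      obtain ⟨k, hk, rfl⟩ := hmem
      simp [PySem.List.pyGetD_natCast, List.getElem?_eq_getElem hk]
    rw [List.map_congr_left h1]
    have h2 : x.toList = (PySem.List.enumerate x.toList 0).map Prod.snd := by
      simpa using (PySem.List.map_snd_enumerate x.toList 0).symm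
    unfold nvchars
    conv_rhs => rw [h2]
    rw [List.filter_map]
    rfl
  simp only [szyfr_alt]
  rw [hnonv, PySem.List.slice_from_neg_one, PySem.List.slice_to_neg_one]
  have hb := B_scatter x.toList
    ((nvchars x.toList).drop ((nvchars x.toList).length - 1) ++ (nvchars x.toList).dropLast) []
  simp only [List.length_nil, Nat.cast_zero, List.nil_append] at hb
  rw [hb, repNV_rot]

-- ===== VERDICT (by name: the statement is the Claim_ definition above) =====
theorem szyfr_spec : Claim_equal_szyfr := by
  intro x _
  unfold Spec_szyfr
  rw [szyfr_eq_ospec, szyfr_alt_eq_ospec]
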